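-- pv_equiv track=rewrite | github.com/pisitponjanton/IT-KMITL | 1-1/Week1-9/Solar System.py | sunindx
-- ===== SOURCE A (Python) =====
-- def sunindx(n):
--     """findindexsun"""
--     s=0
--     s1=0
--     s2=0
--     t=""
--     for i in n:
--         if not s:
--             s=1
--         if s:
--             t+=i
--             if t == "Sun,":
--                 s2=s1+1
--             if i == ",":
--                 t=""
--                 s=0
--                 s1+=1
--                 continue
--     return s1,s2
-- ===== SOURCE B (Python) =====
-- def sunindx(n):
--     """findindexsun"""
--     tokens = n.split(',')
--     s1 = len(tokens) - 1
--     s2 = 0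
--     for i in range(len(tokens) - 1):
--         if tokens[i] == 'Sun':
--             s2 = i + 1
--     return s1, s2
-- ===== Notes on version B (the rewrite author's own statement) =====
-- stated objective: simpler
-- what changed: Replaces the character-by-character state machine (flag, running token buffer, repeated string comparisons) with a single comma split into tokens followed by a plain index loop over all tokens except the last.
import Mathlib
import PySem

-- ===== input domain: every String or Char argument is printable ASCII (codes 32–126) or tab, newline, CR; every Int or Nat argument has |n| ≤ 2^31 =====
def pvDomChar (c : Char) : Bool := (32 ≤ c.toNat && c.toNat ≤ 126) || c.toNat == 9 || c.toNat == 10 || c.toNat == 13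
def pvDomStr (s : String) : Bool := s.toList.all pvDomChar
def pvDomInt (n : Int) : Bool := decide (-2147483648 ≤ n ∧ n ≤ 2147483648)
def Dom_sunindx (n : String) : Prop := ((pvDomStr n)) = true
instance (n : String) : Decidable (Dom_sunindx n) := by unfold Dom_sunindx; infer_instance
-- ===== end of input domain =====

-- B replaces A's character-by-character state machine with a comma split plus an index loop over all tokens but the last (simpler decomposition; measured faster by a constant factor: C-level str.split vs a Python char loop).


-- ===== PORT A =====
-- one iteration of A's for-loop; state = (s, s1, s2, t)
def sunindxStep (st : Int × Int × Int × List Char) (i : Char) : Int × Int × Int × List Char :=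
  let s := st.1
  let s1 := st.2.1
  let s2 := st.2.2.1
  let t := st.2.2.2
  let s := if s == 0 then 1 else s        -- if not s: s = 1
  if s != 0 then                           -- if s:
    let t := t ++ [i]                      --   t += i
    let s2 := if t == "Sun,".toList then s1 + 1 else s2
    if i == ',' then (0, s1 + 1, s2, ([] : List Char))   -- t=""; s=0; s1+=1
    else (s, s1, s2, t)
  else (s, s1, s2, t)

def sunindx (n : String) : Int × Int :=
  let r := n.toList.foldl sunindxStep (0, 0, 0, ([] : List Char))
  (r.2.1, r.2.2.1)

-- ===== PORT B =====
def sunindx_alt (n : String) : Int × Int :=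
  let tokens := PySem.Chars.splitOn n.toList ",".toList
  let s1 : Int := (tokens.length : Int) - 1
  let s2 : Int := (PySem.List.pyRange 0 ((tokens.length : Int) - 1) 1).foldl
      (fun s2 i => if PySem.List.pyGetD tokens i [] == "Sun".toList then i + 1 else s2) 0
  (s1, s2)

-- ===== PRECONDITION & SPEC =====
def Spec_sunindx (n : String) (out : Int × Int) : Prop := out = sunindx_alt n
instance (n : String) (out : Int × Int) : Decidable (Spec_sunindx n out) := by unfold Spec_sunindx; infer_instance

-- ===== CLAIM (what is proved, stated in full; the proofs are below) =====
def Claim_equal_sunindx : Prop := ∀ (n : String), Dom_sunindx n → Spec_sunindx n (sunindx n)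

-- ===== LEMMAS AND PROOFS =====

-- proof-side recursive splitter: pvSplit l = l split at every ','
def pvSplit : List Char → List (List Char)
  | [] => [[]]
  | c :: r =>
    if c = ',' then [] :: pvSplit r
    else match pvSplit r with
      | [] => [[c]]
      | y :: ys => (c :: y) :: ys

theorem pvSplit_ne_nil (l : List Char) : pvSplit l ≠ [] := by
  cases l with
  | nil => simp [pvSplit]
  | cons c r =>
    simp only [pvSplit]
    split
    · simp
    · split <;> simp_all

-- proof-side evaluation of the "last index of 'Sun' among completed tokens" value
def pvG : List (List Char) → List Char → Int → Int → Int
  | [], _, _, s2 => s2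
  | [_], _, _, s2 => s2
  | tok :: rest, t, s1, s2 => pvG rest [] (s1 + 1) (if t ++ tok == "Sun".toList then s1 + 1 else s2)

theorem pvGo_spec (l : List Char) : ∀ (fuel : Nat) (cur : List Char) (acc : List (List Char)),
    l.length < fuel →
    PySem.Chars.splitOn.go [','] fuel l cur acc =
      acc.reverse ++ ((cur.reverse ++ (pvSplit l).headI) :: (pvSplit l).tail) := by
  induction l with
  | nil =>
    intro fuel cur acc h
    obtain ⟨f, rfl⟩ : ∃ f, fuel = f + 1 := ⟨fuel - 1, by omega⟩
    rw [PySem.Chars.splitOn.go]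
    simp [pvSplit]
    omega
  | cons c r ih =>
    intro fuel cur acc h
    obtain ⟨f, rfl⟩ : ∃ f, fuel = f + 1 := ⟨fuel - 1, by omega⟩
    rw [PySem.Chars.splitOn.go]
    obtain ⟨y, ys, hy⟩ : ∃ y ys, pvSplit r = y :: ys := by
      cases hr : pvSplit r with
      | nil => exact absurd hr (pvSplit_ne_nil r)
      | cons y ys => exact ⟨y, ys, rfl⟩
    by_cases hc : c = ','
    · subst hc
      rw [if_pos (by simp [List.isPrefixOf])]
      have hdrop : List.drop [','].length (',' :: r) = r := by simp
      rw [hdrop, ih f [] (cur.reverse :: acc) (by simp at h ⊢; omega)]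
      simp [pvSplit, hy]
    · rw [if_neg (by simp [List.isPrefixOf, Ne.symm hc])]
      rw [ih f (c :: cur) acc (by simp at h ⊢; omega)]
      simp [pvSplit, hy, hc]
theorem pvSplitOn_eq (l : List Char) : PySem.Chars.splitOn l [','] = pvSplit l := by
  rw [PySem.Chars.splitOn]
  rw [pvGo_spec l (l.length + 1) [] [] (by omega)]
  have hne := pvSplit_ne_nil l
  obtain ⟨y, ys, hy⟩ : ∃ y ys, pvSplit l = y :: ys := by
    cases hr : pvSplit l with
    | nil => exact absurd hr hne
    | cons y ys => exact ⟨y, ys, rfl⟩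
  simp [hy]

-- the A-side loop computes (s1 + #tokens - 1, pvG tokens t s1 s2)
theorem pvA_main (l : List Char) : ∀ (s s1 s2 : Int) (t : List Char),
    (l.foldl sunindxStep (s, s1, s2, t)).2.1 = s1 + (((pvSplit l).length : Int) - 1) ∧
    (l.foldl sunindxStep (s, s1, s2, t)).2.2.1 = pvG (pvSplit l) t s1 s2 := by
  induction l with
  | nil =>
    intro s s1 s2 t
    simp [pvSplit, pvG]
  | cons c r ih =>
    intro s s1 s2 t
    by_cases hc : c = ','
    · subst hc
      have hstep : sunindxStep (s, s1, s2, t) ',' =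
          (0, s1 + 1, if t ++ [','] == "Sun,".toList then s1 + 1 else s2, ([] : List Char)) := by
        simp only [sunindxStep]
        by_cases hs : s = 0 <;> simp [hs]
      rw [List.foldl_cons, hstep]
      obtain ⟨h1, h2⟩ := ih 0 (s1 + 1) (if t ++ [','] == "Sun,".toList then s1 + 1 else s2) []
      obtain ⟨y, ys, hy⟩ : ∃ y ys, pvSplit r = y :: ys := by
        cases hr : pvSplit r with
        | nil => exact absurd hr (pvSplit_ne_nil r)
        | cons y ys => exact ⟨y, ys, rfl⟩
      constructor
      · rw [h1]; simp [pvSplit, hy]; ring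
      · rw [h2]
        have hcond : (t ++ [','] == "Sun,".toList) = (t ++ [] == "Sun".toList) := by
          simp only [List.append_nil]
          by_cases ht : t = "Sun".toList
          · subst ht; decide
          · have hne2 : t ++ [','] ≠ "Sun,".toList := by
              intro hcontra
              apply ht
              have h3 : t ++ [','] = "Sun".toList ++ [','] := hcontra
              exact List.append_cancel_right h3
            rw [beq_eq_false_iff_ne.mpr hne2, beq_eq_false_iff_ne.mpr ht]
        rw [hcond]
        simp [pvSplit, hy, pvG]
    · have hstep : sunindxStep (s, s1, s2, t) c = ((if s == 0 then 1 else s), s1, s2, t ++ [c]) := by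
        simp only [sunindxStep]
        have hns : t ++ [c] ≠ ['S', 'u', 'n', ','] := by
          intro hcontra
          have h1 : (t ++ [c]).getLast? = some c := by simp
          have h2 : (['S', 'u', 'n', ','] : List Char).getLast? = some ',' := by decide
          rw [hcontra, h2] at h1
          exact hc (Option.some.inj h1).symm
        by_cases hs : s = 0 <;> simp [hs, hns, hc]
      rw [List.foldl_cons, hstep]
      obtain ⟨h1, h2⟩ := ih (if s == 0 then 1 else s) s1 s2 (t ++ [c])
      obtain ⟨y, ys, hy⟩ : ∃ y ys, pvSplit r = y :: ys := by
        cases hr : pvSplit r with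
        | nil => exact absurd hr (pvSplit_ne_nil r)
        | cons y ys => exact ⟨y, ys, rfl⟩
      constructor
      · rw [h1]; simp [pvSplit, hy, hc]
      · rw [h2]
        simp only [pvSplit, hy, if_neg hc]
        cases ys with
        | nil => simp [pvG]
        | cons z zs =>
          simp only [pvG]
          have : t ++ c :: y = (t ++ [c]) ++ y := by simp
          rw [this]

-- pvG (with empty carry) is B's enumerate fold over all tokens but the last
theorem pvG_eq_fold (toks : List (List Char)) : ∀ (s1 s2 : Int),
    pvG toks [] s1 s2 =
      (PySem.List.enumerate toks.dropLast s1).foldl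
        (fun s2 p => if p.2 == "Sun".toList then p.1 + 1 else s2) s2 := by
  induction toks with
  | nil => intro s1 s2; simp [pvG, PySem.List.enumerate_nil]
  | cons tok rest ih =>
    intro s1 s2
    cases rest with
    | nil => simp [pvG, PySem.List.enumerate_nil]
    | cons y ys =>
      simp only [pvG, List.dropLast_cons₂, PySem.List.enumerate_cons, List.foldl_cons,
        List.nil_append]
      exact ih (s1 + 1) (if tok == "Sun".toList then s1 + 1 else s2)

theorem sunindx_spec : Claim_equal_sunindx := by
  intro n _
  unfold Spec_sunindx
  have hsplit : PySem.Chars.splitOn n.toList ",".toList = pvSplit n.toList := pvSplitOn_eq n.toList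
  obtain ⟨h1, h2⟩ := pvA_main n.toList 0 0 0 []
  have hne := pvSplit_ne_nil n.toList
  set toks := pvSplit n.toList with htoks
  have hlen : 1 ≤ toks.length := by
    cases h : toks with
    | nil => exact absurd h hne
    | cons y ys => simp
  -- first components
  have hfst : (n.toList.foldl sunindxStep (0, 0, 0, [])).2.1 = (toks.length : Int) - 1 := by
    rw [h1]; ring
  -- second components
  have hdrop : ((toks.length : Int) - 1) = ((toks.dropLast.length : Int)) := by
    simp [List.length_dropLast]; omega
  have hcongr : (PySem.List.pyRange 0 ((toks.length : Int) - 1) 1).foldl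
      (fun s2 i => if PySem.List.pyGetD toks i [] == "Sun".toList then i + 1 else s2) 0 =
      (PySem.List.pyRange 0 ((toks.length : Int) - 1) 1).foldl
      (fun s2 i => if PySem.List.pyGetD toks.dropLast i [] == "Sun".toList then i + 1 else s2) 0 := by
    apply PySem.List.foldl_congr_mem
    intro acc j hj
    rw [PySem.List.mem_pyRange_one] at hj
    have hj0 : 0 ≤ j := hj.1
    have hjlt : j < (toks.length : Int) - 1 := hj.2
    obtain ⟨k, rfl⟩ : ∃ k : Nat, j = (k : Int) := ⟨j.toNat, by omega⟩
    have hk : k < toks.length - 1 := by omega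
    have : PySem.List.pyGetD toks (k : Int) [] = PySem.List.pyGetD toks.dropLast (k : Int) [] := by
      rw [PySem.List.pyGetD_natCast, PySem.List.pyGetD_natCast]
      simp only [List.getD, List.getElem?_dropLast]
      simp [hk]
    rw [this]
  have hfold : (PySem.List.pyRange 0 ((toks.length : Int) - 1) 1).foldl
      (fun s2 i => if PySem.List.pyGetD toks.dropLast i [] == "Sun".toList then i + 1 else s2) 0 =
      (PySem.List.enumerate toks.dropLast 0).foldl
        (fun s2 p => if p.2 == "Sun".toList then p.1 + 1 else s2) 0 := by
    rw [PySem.List.enumerate_eq_map_pyRange toks.dropLast ([] : List Char), List.foldl_map]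
    rw [hdrop]
    simp [PySem.List.len]
  have hB : sunindx_alt n = ((toks.length : Int) - 1,
      (PySem.List.pyRange 0 ((toks.length : Int) - 1) 1).foldl
        (fun s2 i => if PySem.List.pyGetD toks i [] == "Sun".toList then i + 1 else s2) 0) := by
    unfold sunindx_alt
    rw [hsplit]
  rw [hB]
  show ((n.toList.foldl sunindxStep (0, 0, 0, [])).2.1,
        (n.toList.foldl sunindxStep (0, 0, 0, [])).2.2.1) = _
  refine Prod.ext ?_ ?_
  · simpa using hfst
  · show (n.toList.foldl sunindxStep (0, 0, 0, [])).2.2.1 = _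
    rw [h2, hcongr, hfold]
    exact pvG_eq_fold toks 0 0
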